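-- pv_equiv track=rewrite | github.com/issol14/20252R0136COSE36203 | src/models/v5_no_lag_cv.py | get_no_lag_features
-- ===== SOURCE A (Python) =====
-- from typing import List, Dict, Tuple, Optional
--
-- def get_no_lag_features(all_features: List[str]) -> List[str]:
--     """Lag/Rolling feature 완전 제외"""
--     exclude_keywords = [
--         "lag_", "rolling_", "diff_", "pct_change",
--         "time_mean_", "weekday_mean_", "month_mean_"  # 기존 leak 가능한 feature도 제외
--     ]
--
--     return [
--         f for f in all_features
--         if not any(kw in f for kw in exclude_keywords)
--     ]
-- ===== SOURCE B (Python) =====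
-- from typing import List, Dict, Tuple, Optional
--
-- # Keywords bucketed by their first character: the string is scanned once, and at
-- # each position only the keywords that can start there are tried.
-- _BY_FIRST = {
--     'l': ("lag_",),
--     'r': ("rolling_",),
--     'd': ("diff_",),
--     'p': ("pct_change",),
--     't': ("time_mean_",),
--     'w': ("weekday_mean_",),
--     'm': ("month_mean_",),
-- }
--
--
-- def _has_excluded(f: str) -> bool:
--     for i, c in enumerate(f):
--         for kw in _BY_FIRST.get(c, ()):
--             if f.startswith(kw, i):
--                 return True
--     return False
--
--
-- def get_no_lag_features(all_features: List[str]) -> List[str]: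
--     """Lag/Rolling feature 완전 제외"""
--     return [f for f in all_features if not _has_excluded(f)]
-- ===== Notes on version B (the rewrite author's own statement) =====
-- stated objective: alternative
-- what changed: Instead of running seven independent substring scans ('kw in f') per feature, B makes a single left-to-right pass over each string and at each position consults a first-character hash bucket, trying only the (at most one) keyword that can start there.
import Mathlib
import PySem

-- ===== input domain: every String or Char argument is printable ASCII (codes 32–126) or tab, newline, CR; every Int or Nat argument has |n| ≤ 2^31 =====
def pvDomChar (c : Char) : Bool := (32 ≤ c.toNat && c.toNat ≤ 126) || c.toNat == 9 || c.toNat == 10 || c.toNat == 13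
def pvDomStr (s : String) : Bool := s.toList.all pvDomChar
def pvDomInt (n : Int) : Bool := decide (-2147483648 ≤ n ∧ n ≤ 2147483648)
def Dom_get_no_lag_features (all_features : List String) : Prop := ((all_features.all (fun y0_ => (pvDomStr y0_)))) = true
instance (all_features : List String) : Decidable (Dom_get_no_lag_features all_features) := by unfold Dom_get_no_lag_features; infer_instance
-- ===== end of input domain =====

-- B replaces seven per-keyword substring scans by one left-to-right pass with a
-- first-character bucket lookup; objective: alternative single-pass algorithm.


-- ===== PORT A =====
def get_no_lag_features (all_features : List String) : List String :=
  let exclude_keywords : List String :=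
    ["lag_", "rolling_", "diff_", "pct_change",
     "time_mean_", "weekday_mean_", "month_mean_"]
  all_features.filter (fun f => !(exclude_keywords.any (fun kw => PySem.Str.isIn kw f)))

-- ===== PORT B =====
-- _BY_FIRST: keywords bucketed by first character
def pvByFirst : PySem.Dict Char (List String) :=
  PySem.Dict.mk
    [('l', ["lag_"]), ('r', ["rolling_"]), ('d', ["diff_"]), ('p', ["pct_change"]),
     ('t', ["time_mean_"]), ('w', ["weekday_mean_"]), ('m', ["month_mean_"])]

-- _has_excluded: one pass over the string; f.startswith(kw, i) with 0 ≤ i ≤ len(f)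
-- is exactly 'kw.toList is a prefix of (f.toList.drop i)'.
def pvHasExcluded (f : String) : Bool :=
  (PySem.List.enumerate f.toList 0).any (fun ic =>
    (pvByFirst.getD ic.2 []).any (fun kw =>
      PySem.Chars.startswith (f.toList.drop ic.1.toNat) kw.toList))

def get_no_lag_features_alt (all_features : List String) : List String :=
  all_features.filter (fun f => !(pvHasExcluded f))

-- ===== PRECONDITION & SPEC =====
def Spec_get_no_lag_features (all_features : List String) (out : List String) : Prop := out = get_no_lag_features_alt all_features
instance (all_features : List String) (out : List String) : Decidable (Spec_get_no_lag_features all_features out) := by unfold Spec_get_no_lag_features; infer_instance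

-- ===== CLAIM (what is proved, stated in full; the proofs are below) =====
def Claim_equal_get_no_lag_features : Prop := ∀ (all_features : List String), Dom_get_no_lag_features all_features → Spec_get_no_lag_features all_features (get_no_lag_features all_features)

-- ===== LEMMAS AND PROOFS =====

def pvExclude : List String :=
  ["lag_", "rolling_", "diff_", "pct_change", "time_mean_", "weekday_mean_", "month_mean_"]

-- every keyword in a bucket is an exclude keyword whose first character is the key
theorem pvBucket_sound (c : Char) (kw : String) (h : kw ∈ pvByFirst.getD c []) :
    kw ∈ pvExclude ∧ kw.toList.head? = some c := by
  simp only [pvByFirst, PySem.Dict.getD, PySem.Dict.get?_mk_cons] at h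
  repeat' split at h
  all_goals simp_all [pvExclude, PySem.Dict.get?]
  all_goals assumption

-- every exclude keyword sits in the bucket of its first character
theorem pvBucket_complete (kw : String) (h : kw ∈ pvExclude) (c : Char)
    (hc : kw.toList.head? = some c) : kw ∈ pvByFirst.getD c [] := by
  fin_cases h <;> (simp only [String.toList] at hc; injection hc with hc; subst hc; decide)

theorem pvHasExcluded_eq (f : String) :
    pvHasExcluded f = pvExclude.any (fun kw => PySem.Str.isIn kw f) := by
  cases hA : pvExclude.any (fun kw => PySem.Str.isIn kw f)
  · rw [Bool.eq_false_iff]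
    intro hB
    simp only [pvHasExcluded, List.any_eq_true] at hB
    obtain ⟨ic, hmem, kw, hkw, hpre⟩ := hB
    obtain ⟨hex, _⟩ := pvBucket_sound ic.2 kw hkw
    rw [List.any_eq_false] at hA
    have := hA kw hex
    rw [PySem.Str.isIn_eq] at this
    apply this
    rw [← PySem.Chars.exists_prefix_drop_iff_isIn]
    exact ⟨ic.1.toNat, (PySem.Chars.startswith_iff _ _).mp hpre⟩
  · simp only [List.any_eq_true] at hA
    obtain ⟨kw, hex, hin⟩ := hA
    rw [PySem.Str.isIn_eq, ← PySem.Chars.exists_prefix_drop_iff_isIn] at hin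
    obtain ⟨j, hpre⟩ := hin
    -- kw is nonempty (all seven literals are), so position j is inside f
    have hkwne : kw.toList ≠ [] := by fin_cases hex <;> decide
    have hdropne : f.toList.drop j ≠ [] := by
      intro hnil; rw [hnil] at hpre
      exact hkwne (List.prefix_nil.mp hpre)
    have hj : j < f.toList.length := by
      by_contra hge
      exact hdropne (List.drop_eq_nil_of_le (by omega))
    -- the character at j is kw's first character
    have hhead : f.toList[j]? = kw.toList.head? := by
      rw [← List.head?_drop]
      obtain ⟨t, ht⟩ := hpre
      rw [← ht, List.head?_append_of_ne_nil _ hkwne]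
    obtain ⟨c, hc⟩ : ∃ c, kw.toList.head? = some c := by
      cases h : kw.toList with
      | nil => exact absurd h hkwne
      | cons a t => exact ⟨a, rfl⟩
    have hcj : f.toList[j] = c := by
      have : f.toList[j]? = some c := by rw [hhead, hc]
      simpa [List.getElem?_eq_getElem hj] using this
    rw [pvHasExcluded, List.any_eq_true]
    refine ⟨((j : Int), f.toList[j]), ?_, ?_⟩
    · rw [PySem.List.mem_enumerate_iff]
      exact ⟨j, hj, by simp⟩
    · rw [List.any_eq_true]
      refine ⟨kw, ?_, ?_⟩
      · simp only [hcj]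
        exact pvBucket_complete kw hex c hc
      · rw [PySem.Chars.startswith_iff]
        simpa using hpre
-- ===== VERDICT (by name: the statement is the Claim_ definition above) =====
theorem get_no_lag_features_spec : Claim_equal_get_no_lag_features := by
  intro all_features _
  unfold Spec_get_no_lag_features get_no_lag_features get_no_lag_features_alt
  exact List.filter_congr (fun f _ => by rw [pvHasExcluded_eq]; rfl)
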